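-- pv_equiv track=rewrite | github.com/lks-ai/web_crawler_project | crawler/crawler.py | chunk_content
-- ===== SOURCE A (Python) =====
-- from typing import List, Optional
--
-- def chunk_content(content: str, max_tokens: int) -> List[str]:
--     # Simple chunking based on paragraphs
--     paragraphs = content.split('\n\n')
--     chunks = []
--     current_chunk = ""
--     current_tokens = 0
--
--     for para in paragraphs:
--         tokens = len(para.split())
--         if current_tokens + tokens > max_tokens:
--             if current_chunk:
--                 chunks.append(current_chunk)
--                 current_chunk = ""
--                 current_tokens = 0
--         current_chunk += para + "\n\n"
--         current_tokens += tokens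
--
--     if current_chunk:
--         chunks.append(current_chunk)
--
--     return chunks
-- ===== SOURCE B (Python) =====
-- from typing import List
--
-- def chunk_content(content: str, max_tokens: int) -> List[str]:
--     # Greedy maximal-prefix consumer: repeatedly carve the longest paragraph
--     # prefix (at least one paragraph) whose token sum stays <= max_tokens off
--     # the front of the list, rendering each carved group as one chunk.
--     def carve(paras: List[str]):
--         total = len(paras[0].split())
--         taken = [paras[0]]
--         rest = paras[1:]
--         while rest and total + len(rest[0].split()) <= max_tokens:
--             total += len(rest[0].split())
--             taken.append(rest.pop(0))
--         return taken, rest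
--
--     paras = content.split('\n\n')
--     chunks: List[str] = []
--     while paras:
--         group, paras = carve(paras)
--         chunks.append(''.join(p + '\n\n' for p in group))
--     return chunks
-- ===== Notes on version B (the rewrite author's own statement) =====
-- stated objective: alternative
-- what changed: Replaces A's single stateful fold (running chunk string + token counter with flush-on-overflow) by a consumer loop that repeatedly carves the maximal admissible paragraph prefix off the front of the list and renders each carved group as a chunk; no cross-chunk accumulator state.
import Mathlib
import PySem

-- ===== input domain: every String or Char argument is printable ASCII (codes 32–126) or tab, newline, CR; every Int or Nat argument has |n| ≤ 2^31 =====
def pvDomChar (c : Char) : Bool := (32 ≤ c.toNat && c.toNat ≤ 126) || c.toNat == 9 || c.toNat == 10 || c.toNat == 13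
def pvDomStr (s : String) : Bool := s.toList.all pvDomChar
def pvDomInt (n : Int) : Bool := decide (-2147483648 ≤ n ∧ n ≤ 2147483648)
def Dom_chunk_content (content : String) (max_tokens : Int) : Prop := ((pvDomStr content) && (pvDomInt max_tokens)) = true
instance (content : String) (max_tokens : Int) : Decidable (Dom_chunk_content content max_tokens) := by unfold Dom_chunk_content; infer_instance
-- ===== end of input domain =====

-- B replaces A's stateful fold by a consumer that repeatedly carves the maximal admissible
-- paragraph prefix off the front of the list; same cost, different algorithmic decomposition.

-- ===== PORT A =====
def chunk_content (content : String) (max_tokens : Int) : List String :=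
  let paragraphs := (PySem.Str.split? content "\n\n").getD []
  let st := paragraphs.foldl (fun (st : List String × String × Int) para =>
    let tokens : Int := (PySem.Str.split₀ para).length
    let st :=
      if st.2.2 + tokens > max_tokens then
        if st.2.1 ≠ "" then (st.1 ++ [st.2.1], "", (0 : Int)) else st
      else st
    (st.1, st.2.1 ++ para ++ "\n\n", st.2.2 + tokens)) ([], "", (0 : Int))
  if st.2.1 ≠ "" then st.1 ++ [st.2.1] else st.1

-- ===== PORT B =====
-- the while loop inside carve: scan the remainder, taking paragraphs while the sum fits
def pvCarve (max_tokens : Int) : Int → List String → List String × List String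
  | _, [] => ([], [])
  | total, p :: rest =>
    let tk : Int := ((PySem.Str.split₀ p).length : Int)
    if total + tk ≤ max_tokens then
      let pr := pvCarve max_tokens (total + tk) rest
      (p :: pr.1, pr.2)
    else ([], p :: rest)

theorem pvCarve_snd_length (max_tokens : Int) :
    ∀ (t : Int) (ps : List String), ((pvCarve max_tokens t ps).2).length ≤ ps.length := by
  intro t ps
  induction ps generalizing t with
  | nil => simp [pvCarve]
  | cons p rest ih =>
    simp only [pvCarve]
    split
    · exact Nat.le_succ_of_le (ih _)
    · simp

-- the outer while loop: carve one group, render it, continue on the remainder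
def pvConsume (max_tokens : Int) : List String → List String
  | [] => []
  | p :: rest =>
    let pr := pvCarve max_tokens ((PySem.Str.split₀ p).length : Int) rest
    String.join ((p :: pr.1).map (fun q => q ++ "\n\n")) :: pvConsume max_tokens pr.2
termination_by l => l.length
decreasing_by
  have := pvCarve_snd_length max_tokens ((PySem.Str.split₀ p).length : Int) rest
  simpa using Nat.lt_succ_of_le this

def chunk_content_alt (content : String) (max_tokens : Int) : List String :=
  pvConsume max_tokens ((PySem.Str.split? content "\n\n").getD [])

-- ===== PRECONDITION & SPEC =====
def Spec_chunk_content (content : String) (max_tokens : Int) (out : List String) : Prop := out = chunk_content_alt content max_tokens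
instance (content : String) (max_tokens : Int) (out : List String) : Decidable (Spec_chunk_content content max_tokens out) := by unfold Spec_chunk_content; infer_instance

-- ===== CLAIM (what is proved, stated in full; the proofs are below) =====
def Claim_equal_chunk_content : Prop := ∀ (content : String) (max_tokens : Int), Dom_chunk_content content max_tokens → Spec_chunk_content content max_tokens (chunk_content content max_tokens)

-- ===== LEMMAS AND PROOFS =====

def pvRender (g : List String) : String := String.join (g.map (fun p => p ++ "\n\n"))

theorem pvJoin_snoc (l : List String) (s : String) :
    String.join (l ++ [s]) = String.join l ++ s := by
  simp [String.join, List.foldl_append]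

theorem pvRender_snoc (g : List String) (p : String) :
    pvRender (g ++ [p]) = pvRender g ++ (p ++ "\n\n") := by
  simp [pvRender, pvJoin_snoc]

theorem pvFoldl_append_length (l : List String) : ∀ a : String,
    a.length ≤ (List.foldl (· ++ ·) a l).length := by
  induction l with
  | nil => intro a; simp
  | cons x xs ih =>
    intro a
    calc a.length ≤ (a ++ x).length := by simp
    _ ≤ _ := ih (a ++ x)

theorem pvRender_ne_empty (g : List String) (h : g ≠ []) : pvRender g ≠ "" := by
  cases g with
  | nil => exact absurd rfl h
  | cons p rest =>
    intro hc
    have h2 := pvFoldl_append_length (rest.map (fun q => q ++ "\n\n")) ("" ++ (p ++ "\n\n"))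
    rw [show List.foldl (· ++ ·) ("" ++ (p ++ "\n\n")) (rest.map (fun q => q ++ "\n\n"))
        = pvRender (p :: rest) from rfl, hc] at h2
    simp [String.length_append] at h2

-- A's loop, named, so the invariant can be stated about it
def pvFoldA (max_tokens : Int) (ps : List String) (st : List String × String × Int) :
    List String × String × Int :=
  ps.foldl (fun (st : List String × String × Int) para =>
    let tokens : Int := (PySem.Str.split₀ para).length
    let st :=
      if st.2.2 + tokens > max_tokens then
        if st.2.1 ≠ "" then (st.1 ++ [st.2.1], "", (0 : Int)) else st
      else st
    (st.1, st.2.1 ++ para ++ "\n\n", st.2.2 + tokens)) st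

def pvFinalize (st : List String × String × Int) : List String :=
  if st.2.1 ≠ "" then st.1 ++ [st.2.1] else st.1

-- Invariant: with a nonempty current group g (rendered) and running total t, A's remaining
-- loop plus final flush produces the carved extension of g followed by B's chunks of the rest.
theorem pvLoopA_carve (max_tokens : Int) (ps : List String) :
    ∀ (acc : List String) (g : List String) (t : Int), g ≠ [] →
    pvFinalize (pvFoldA max_tokens ps (acc, pvRender g, t))
      = acc ++ [pvRender (g ++ (pvCarve max_tokens t ps).1)]
          ++ pvConsume max_tokens (pvCarve max_tokens t ps).2 := by
  induction ps with
  | nil =>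
    intro acc g t hg
    simp [pvFoldA, pvFinalize, pvCarve, pvConsume, pvRender_ne_empty g hg]
  | cons p rest ih =>
    intro acc g t hg
    have hrne : pvRender g ≠ "" := pvRender_ne_empty g hg
    simp only [pvFoldA, List.foldl_cons, pvCarve]
    by_cases hfit : t + ((PySem.Str.split₀ p).length : Int) ≤ max_tokens
    · have hnot : ¬ (t + ((PySem.Str.split₀ p).length : Int) > max_tokens) := by omega
      simp only [hnot, if_neg, not_false_eq_true, hfit, if_pos]
      rw [show pvRender g ++ p ++ "\n\n" = pvRender (g ++ [p]) by
        simp [pvRender_snoc, String.append_assoc]]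
      have := ih acc (g ++ [p]) (t + ((PySem.Str.split₀ p).length : Int)) (by simp)
      simpa [pvFoldA, List.append_assoc] using this
    · have hgt : t + ((PySem.Str.split₀ p).length : Int) > max_tokens := by omega
      simp only [hgt, if_pos, ne_eq, hrne, not_false_eq_true, hfit, if_neg]
      rw [show "" ++ p ++ "\n\n" = pvRender [p] by simp [pvRender, String.join]]
      have := ih (acc ++ [pvRender g]) [p] ((0:Int) + ((PySem.Str.split₀ p).length : Int))
        (by simp)
      simpa [pvFoldA, pvConsume, pvRender, List.append_assoc] using this

-- ===== VERDICT (by name: the statement is the Claim_ definition above) =====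
theorem chunk_content_spec : Claim_equal_chunk_content := by
  intro content max_tokens _
  unfold Spec_chunk_content chunk_content chunk_content_alt
  cases hps : (PySem.Str.split? content "\n\n").getD [] with
  | nil => simp [pvConsume]
  | cons p rest =>
    show pvFinalize (pvFoldA max_tokens (p :: rest) ([], "", 0)) = pvConsume max_tokens (p :: rest)
    have hstep : pvFoldA max_tokens (p :: rest) ([], "", 0)
        = pvFoldA max_tokens rest ([], pvRender [p], ((PySem.Str.split₀ p).length : Int)) := by
      simp only [pvFoldA, List.foldl_cons]
      by_cases h : (0:Int) + ((PySem.Str.split₀ p).length : Int) > max_tokens <;>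
        simp [pvRender, String.join]
    rw [hstep, pvLoopA_carve max_tokens rest [] [p] _ (by simp)]
    simp [pvConsume, pvRender]
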